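-- pv_equiv track=rewrite | github.com/yaskad4/python-course-unsam | clase4/propaga.py | propagarmio
-- ===== SOURCE A (Python) =====
-- def propagarmio(lista):
--     """ Ejercicio 4.6 Propagacion. Imaginate una fila con varios fósforos uno al lado del otro. Los fósforos pueden estar en tres estados: nuevos, prendidos fuego o ya gastados (carbonizados). Representaremos esta situación con una lista L con un elemento por fósforo, que en cada posición tiene un 0 (nuevo), un 1 (encendido) o un -1 (carbonizado). El fuego se propaga inmediatamente de un fósforo encendido a cualquier fósforo nuevo que tenga a su lado. Los fósforos carbonizados no se encienden nuevamente.
--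
--     Escribí una función llamada propagar que reciba un vector con 0's, 1's y -1's y devuelva un vector en el que los 1's se propagaron a sus vecinos con 0. Guardalo en un archivo propaga.py."""
--
--     largo_lista = len(lista)
--     for i, e in enumerate(lista):
--
--         if e == 1 and  (0 <= i < largo_lista):
--             #propaga derecha
--             for derecha in range(i + 1, largo_lista): # va del siguiente a la derecha hasta el final
--                 if lista[derecha] == -1: # este es el unico que me interesa, ya que siempre que sea 0 o 1 lo dejo encendido
--                     break
--                 lista[derecha] = 1
--             #propaga izquierda
--             for izquierda in range(i - 1, -1, -1):  # va desde el anterior hasta el primero de la lista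
--                 if lista[izquierda] == -1:
--                     break
--                 lista[izquierda] = 1
--     return lista
-- ===== SOURCE B (Python) =====
-- def propagarmio(lista):
--     if 1 not in lista:      # no burning match anywhere: nothing propagates
--         return lista
--     res = []
--     i = 0
--     n = len(lista)
--     while i < n:
--         try:
--             j = lista.index(-1, i)
--         except ValueError:
--             j = n
--         seg = lista[i:j]
--         res.extend([1] * (j - i) if 1 in seg else seg)
--         if j < n:
--             res.append(-1)
--         i = j + 1
--     lista[:] = res
--     return lista
-- ===== Notes on version B (the rewrite author's own statement) =====
-- stated objective: alternative
-- what changed: A scans every index and, for each 1 it sees, re-burns the whole -1-bounded segment to the left and right; B returns the list unchanged when it contains no 1, and otherwise makes one segment-at-a-time pass (index/slice per -1-bounded segment) that emits a segment as all 1s iff it contains a 1.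
import Mathlib
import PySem

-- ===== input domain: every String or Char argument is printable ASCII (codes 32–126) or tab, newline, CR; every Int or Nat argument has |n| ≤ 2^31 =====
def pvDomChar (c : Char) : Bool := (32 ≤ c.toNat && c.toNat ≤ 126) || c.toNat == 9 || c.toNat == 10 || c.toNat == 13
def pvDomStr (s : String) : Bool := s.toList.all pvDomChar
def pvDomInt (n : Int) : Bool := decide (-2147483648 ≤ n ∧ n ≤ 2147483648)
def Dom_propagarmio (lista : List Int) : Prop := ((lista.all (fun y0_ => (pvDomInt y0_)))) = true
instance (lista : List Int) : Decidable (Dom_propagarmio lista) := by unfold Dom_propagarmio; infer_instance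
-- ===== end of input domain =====

-- B replaces A's per-1 left/right re-burning of each -1-bounded segment by a single segment-at-a-time
-- pass that fills a segment with 1s iff it contains a 1; A mutates its argument in place and B performs
-- the same in-place update in Python; the Lean claim is about the return value.

-- ===== PORT A =====
-- inner loop `for derecha in range(i+1, largo)` with `break` at -1, setting 1 otherwise
def burnR (l : List Int) (j : Nat) : List Int :=
  if h : j < l.length then
    if l.getD j 0 = -1 then l else burnR (l.set j 1) (j + 1)
  else l
  termination_by l.length - j
  decreasing_by simp [List.length_set]; omega

-- inner loop `for izquierda in range(i-1, -1, -1)` with `break` at -1 (called only with start index ≥ 0)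
def burnL : List Int → Nat → List Int
  | l, 0 => if l.getD 0 0 = -1 then l else l.set 0 1
  | l, k + 1 => if l.getD (k + 1) 0 = -1 then l else burnL (l.set (k + 1) 1) k

-- one iteration of the outer `for i, e in enumerate(lista)` body (enumerate reads the live list)
def stepF (l : List Int) (i : Nat) : List Int :=
  if l.getD i 0 = 1 ∧ i < l.length then
    let l1 := burnR l (i + 1)
    if i = 0 then l1 else burnL l1 (i - 1)
  else l

def propagarmio (lista : List Int) : List Int :=
  (List.range lista.length).foldl stepF lista

-- ===== PORT B =====
-- `[1]*(j-i) if 1 in seg else seg`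
def fillSeg (seg : List Int) : List Int :=
  if 1 ∈ seg then List.replicate seg.length 1 else seg

-- the `while i < n` loop of B, viewed from the suffix `lista[i:]`; `lista.index(-1, i)` is
-- `findIdx?` on that suffix (`none` = the ValueError branch, j = n)
def altGo (l : List Int) : List Int :=
  match hj : l.findIdx? (fun x => x == -1) with
  | none => fillSeg l
  | some j => fillSeg (l.take j) ++ [-1] ++ altGo (l.drop (j + 1))
  termination_by l.length
  decreasing_by
    have hjl : j < l.length := by
      rw [List.findIdx?_eq_some_iff_getElem] at hj
      exact hj.1
    simp [List.length_drop]; omega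

-- `if 1 not in lista: return lista` fast path, then the segment loop
def propagarmio_alt (lista : List Int) : List Int :=
  if (1 : Int) ∈ lista then altGo lista else lista

-- ===== PRECONDITION & SPEC =====
def Spec_propagarmio (lista : List Int) (out : List Int) : Prop := out = propagarmio_alt lista
instance (lista : List Int) (out : List Int) : Decidable (Spec_propagarmio lista out) := by unfold Spec_propagarmio; infer_instance

-- ===== CLAIM (what is proved, stated in full; the proofs are below) =====
def Claim_equal_propagarmio : Prop := ∀ (lista : List Int), Dom_propagarmio lista → Spec_propagarmio lista (propagarmio lista)

-- ===== LEMMAS AND PROOFS =====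

-- common recursive description: process the list splitting at -1, current segment accumulated in `seg`
def spec1 : List Int → List Int → List Int
  | seg, [] => fillSeg seg
  | seg, e :: t => if e = -1 then fillSeg seg ++ -1 :: spec1 [] t else spec1 (seg ++ [e]) t

theorem getD_set_ne (l : List Int) (n m : Nat) (a d : Int) (h : n ≠ m) :
    (l.set m a).getD n d = l.getD n d := by
  simp [List.getD, List.getElem?_set_ne (Ne.symm h)]

theorem length_fillSeg (seg : List Int) : (fillSeg seg).length = seg.length := by
  unfold fillSeg; split <;> simp

theorem cons_one_replicate (m : Nat) (r : List Int) :
    (1 : Int) :: (List.replicate m 1 ++ r) = List.replicate m 1 ++ 1 :: r := by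
  rw [← List.cons_append, ← List.replicate_succ, List.replicate_succ', List.append_assoc]
  rfl

def Boundary (r : List Int) : Prop := r = [] ∨ ∃ t, r = -1 :: t

theorem burnR_eq (d : Nat) (s r : List Int) (j : Nat) (hd : s.length - j = d)
    (hs : ∀ x ∈ s, x ≠ -1) (hr : Boundary r) (hj : j ≤ s.length) :
    burnR (s ++ r) j = s.take j ++ List.replicate (s.length - j) 1 ++ r := by
  induction d generalizing s j with
  | zero =>
    have hj' : j = s.length := by omega
    subst hj'
    rw [burnR]
    rcases hr with h | ⟨t, h⟩ <;> subst h
    · simp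
    · have hlen : s.length < (s ++ (-1 : Int) :: t).length := by simp
      rw [dif_pos hlen, List.getD_append_right _ _ _ _ (le_refl _)]
      simp
  | succ d ih =>
    have hjl : j < s.length := by omega
    rw [burnR]
    have hlen : j < (s ++ r).length := by simp; omega
    rw [dif_pos hlen, List.getD_append _ _ _ _ hjl,
        List.getD_eq_getElem _ _ hjl]
    have hne : s[j] ≠ -1 := hs _ (List.getElem_mem hjl)
    rw [if_neg hne, List.set_append_left _ _ hjl]
    rw [ih (s.set j 1) (j + 1) (by simp [List.length_set]; omega)
        (fun x hx => by rcases List.mem_or_eq_of_mem_set hx with h | h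
                        · exact hs _ h
                        · subst h; decide)
        (by simp [List.length_set]; omega)]
    have ht : (s.set j 1).take (j + 1) = s.take j ++ [1] := by
      rw [List.take_succ_eq_append_getElem (by simp [List.length_set]; omega)]
      have h1 : (s.set j 1).take j = s.take j := by
        rw [List.set_eq_take_cons_drop 1 hjl, List.take_append_of_le_length (by simp; omega)]
        simp [List.take_take]
      rw [h1, List.getElem_set_self (by simp [List.length_set]; omega)]
    rw [ht, List.length_set]
    have h2 : s.length - j = (s.length - (j + 1)) + 1 := by omega
    rw [h2, List.replicate_succ]
    simp [cons_one_replicate]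

theorem burnL_eq (k : Nat) (l : List Int) (hk : k < l.length)
    (h : ∀ m, m ≤ k → l.getD m 0 ≠ -1) :
    burnL l k = List.replicate (k + 1) 1 ++ l.drop (k + 1) := by
  induction k generalizing l with
  | zero =>
    rw [burnL, if_neg (h 0 (le_refl _))]
    cases l with
    | nil => simp at hk
    | cons a t => simp [List.set]
  | succ k ih =>
    rw [burnL, if_neg (h (k + 1) (le_refl _))]
    rw [ih (l.set (k + 1) 1) (by simp [List.length_set]; omega)
        (fun m hm => by rw [getD_set_ne _ _ _ _ _ (by omega)]; exact h m (by omega))]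
    rw [List.set_eq_take_cons_drop 1 hk]
    rw [List.drop_append_of_le_length (by simp [List.length_take]; omega)]
    have : (l.take (k + 1)).drop (k + 1) = [] := by
      simp
    rw [this]
    have : List.replicate (k + 1 + 1) (1 : Int) = List.replicate (k + 1) 1 ++ [1] := by
      rw [List.replicate_add]; simp
    rw [this]
    simp

theorem burnR_shift (d : Nat) (c u : List Int) (j : Nat) (hd : u.length - j = d) :
    burnR (c ++ -1 :: u) (c.length + 1 + j) = c ++ -1 :: burnR u j := by
  induction d generalizing u j with
  | zero =>
    have h1 : ¬ c.length + 1 + j < (c ++ (-1 : Int) :: u).length := by simp; omega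
    have h2 : ¬ j < u.length := by omega
    conv_lhs => rw [burnR]
    rw [dif_neg h1]
    conv_rhs => rw [burnR]
    rw [dif_neg h2]
  | succ d ih =>
    have hju : j < u.length := by omega
    have h1 : c.length + 1 + j < (c ++ (-1 : Int) :: u).length := by simp; omega
    have hg : (c ++ -1 :: u).getD (c.length + 1 + j) 0 = u.getD j 0 := by
      rw [List.getD_append_right _ _ _ _ (by omega)]
      have : c.length + 1 + j - c.length = j + 1 := by omega
      rw [this]; rfl
    conv_lhs => rw [burnR]
    rw [dif_pos h1, hg]
    conv_rhs => rw [burnR]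
    rw [dif_pos hju]
    split
    · rfl
    · have hset : (c ++ -1 :: u).set (c.length + 1 + j) 1 = c ++ -1 :: u.set j 1 := by
        rw [List.set_append_right _ _ (by omega)]
        have : c.length + 1 + j - c.length = j + 1 := by omega
        rw [this]; rfl
      rw [hset]
      have : c.length + 1 + j + 1 = c.length + 1 + (j + 1) := by omega
      rw [this]
      exact ih (u.set j 1) (j + 1) (by simp [List.length_set]; omega)

theorem burnL_shift (c u : List Int) (k : Nat) :
    burnL (c ++ -1 :: u) (c.length + 1 + k) = c ++ -1 :: burnL u k := by
  induction k generalizing u with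
  | zero =>
    have hg : (c ++ -1 :: u).getD (c.length + 1 + 0) 0 = u.getD 0 0 := by
      rw [List.getD_append_right _ _ _ _ (by omega)]
      have : c.length + 1 + 0 - c.length = 1 := by omega
      rw [this]; rfl
    have he : c.length + 1 + 0 = c.length + 1 := by omega
    rw [he] at hg ⊢
    rw [burnL, burnL, hg]
    split
    · rfl
    · -- inner call hits the -1 wall at index c.length
      have hset : (c ++ -1 :: u).set (c.length + 1) 1 = c ++ -1 :: u.set 0 1 := by
        rw [List.set_append_right _ _ (by omega)]
        have : c.length + 1 - c.length = 1 := by omega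
        rw [this]; rfl
      rw [hset]
      have hwall : (c ++ -1 :: u.set 0 1).getD c.length 0 = -1 := by
        rw [List.getD_append_right _ _ _ _ (le_refl _)]; simp
      cases hc : c.length with
      | zero =>
        rw [burnL]
        rw [hc] at hwall
        rw [if_pos hwall]
      | succ m =>
        rw [burnL]
        rw [hc] at hwall
        rw [if_pos hwall]
  | succ k ih =>
    have he : c.length + 1 + (k + 1) = (c.length + 1 + k) + 1 := by omega
    rw [he, burnL, burnL]
    have hg : (c ++ -1 :: u).getD (c.length + 1 + k + 1) 0 = u.getD (k + 1) 0 := by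
      rw [List.getD_append_right _ _ _ _ (by omega)]
      have : c.length + 1 + k + 1 - c.length = k + 2 := by omega
      rw [this]; rfl
    rw [hg]
    split
    · rfl
    · have hset : (c ++ -1 :: u).set (c.length + 1 + k + 1) 1 = c ++ -1 :: u.set (k + 1) 1 := by
        rw [List.set_append_right _ _ (by omega)]
        have : c.length + 1 + k + 1 - c.length = k + 2 := by omega
        rw [this]; rfl
      rw [hset]
      exact ih (u.set (k + 1) 1)

theorem stepF_shift (c u : List Int) (i : Nat) :
    stepF (c ++ -1 :: u) (c.length + 1 + i) = c ++ -1 :: stepF u i := by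
  unfold stepF
  have hg : (c ++ -1 :: u).getD (c.length + 1 + i) 0 = u.getD i 0 := by
    rw [List.getD_append_right _ _ _ _ (by omega)]
    have : c.length + 1 + i - c.length = i + 1 := by omega
    rw [this]; rfl
  have hlen : (c.length + 1 + i < (c ++ (-1:Int) :: u).length) ↔ i < u.length := by
    simp; omega
  by_cases hc : u.getD i 0 = 1 ∧ i < u.length
  · rw [if_pos ⟨by rw [hg]; exact hc.1, by rw [hlen]; exact hc.2⟩, if_pos hc]
    have hbr : burnR (c ++ -1 :: u) (c.length + 1 + i + 1) = c ++ -1 :: burnR u (i + 1) := by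
      have : c.length + 1 + i + 1 = c.length + 1 + (i + 1) := by omega
      rw [this]
      exact burnR_shift (u.length - (i + 1)) c u (i + 1) rfl
    rw [hbr]
    by_cases hi : i = 0
    · subst hi
      rw [if_pos rfl, if_neg (by omega)]
      -- burnL at index c.length hits the -1 wall
      have : c.length + 1 + 0 - 1 = c.length := by omega
      rw [this]
      have hwall : (c ++ -1 :: burnR u 1).getD c.length 0 = -1 := by
        rw [List.getD_append_right _ _ _ _ (le_refl _)]; simp
      cases hc2 : c.length with
      | zero => rw [burnL]; rw [hc2] at hwall; rw [if_pos hwall]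
      | succ m => rw [burnL]; rw [hc2] at hwall; rw [if_pos hwall]
    · rw [if_neg hi, if_neg (by omega)]
      obtain ⟨i', rfl⟩ : ∃ i', i = i' + 1 := ⟨i - 1, by omega⟩
      have h1 : c.length + 1 + (i' + 1) - 1 = c.length + 1 + i' := by omega
      have h2 : i' + 1 - 1 = i' := by omega
      rw [h1, h2]
      exact burnL_shift c (burnR u (i' + 1 + 1)) i'
  · rw [if_neg (by rw [hg, hlen]; exact hc), if_neg hc]

theorem foldl_stepF_shift (idxs : List Nat) (c u : List Int) :
    List.foldl stepF (c ++ -1 :: u) (idxs.map (fun i => c.length + 1 + i)) =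
      c ++ -1 :: List.foldl stepF u idxs := by
  induction idxs generalizing u with
  | nil => rfl
  | cons i rest ih =>
    simp only [List.map_cons, List.foldl_cons]
    rw [stepF_shift]
    exact ih (stepF u i)

theorem filled_id (n : Nat) (r : List Int) (i : Nat) (hr : Boundary r) (hi : i < n) :
    stepF (List.replicate n 1 ++ r) i = List.replicate n 1 ++ r := by
  unfold stepF
  have hg : (List.replicate n (1:Int) ++ r).getD i 0 = 1 := by
    rw [List.getD_append _ _ _ _ (by simp; omega)]
    exact List.getD_replicate _ hi
  rw [if_pos ⟨hg, by simp; omega⟩]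
  have hbr : burnR (List.replicate n (1:Int) ++ r) (i + 1) =
      List.replicate n 1 ++ r := by
    rw [burnR_eq (n - (i + 1)) _ r (i + 1) (by simp) (by simp) hr (by simp; omega)]
    rw [List.take_replicate]
    have hmin : min (i + 1) n = i + 1 := by omega
    rw [hmin, ← List.replicate_add]
    have : i + 1 + ((List.replicate n (1:Int)).length - (i + 1)) = n := by simp; omega
    rw [this]
  rw [hbr]
  by_cases hi0 : i = 0
  · rw [if_pos hi0]
  · rw [if_neg hi0]
    rw [burnL_eq (i - 1) _ (by simp; omega)
        (fun m hm => by
          rw [List.getD_append _ _ _ _ (by simp; omega)]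
          rw [List.getD_replicate _ (by omega)]; decide)]
    have hd : (List.replicate n (1:Int) ++ r).drop (i - 1 + 1) =
        List.replicate (n - i) 1 ++ r := by
      rw [List.drop_append_of_le_length (by simp; omega), List.drop_replicate]
      have : (i - 1 + 1) = i := by omega
      rw [this]
    rw [hd, ← List.append_assoc, ← List.replicate_add]
    have : i - 1 + 1 + (n - i) = n := by omega
    rw [this]

theorem filled_fold (idxs : List Nat) (n : Nat) (r : List Int) (hr : Boundary r)
    (h : ∀ i ∈ idxs, i < n) :
    List.foldl stepF (List.replicate n 1 ++ r) idxs = List.replicate n 1 ++ r := by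
  induction idxs with
  | nil => rfl
  | cons i rest ih =>
    rw [List.foldl_cons, filled_id n r i hr (h i (by simp))]
    exact ih (fun j hj => h j (by simp [hj]))

theorem seg_scan (d : Nat) (s r : List Int) (j : Nat) (hd : s.length - j = d)
    (hs : ∀ x ∈ s, x ≠ -1) (hr : Boundary r) (hj : j ≤ s.length)
    (hpre : ∀ m, m < j → s.getD m 0 ≠ 1) :
    List.foldl stepF (s ++ r) (List.range' j (s.length - j)) = fillSeg s ++ r := by
  induction d generalizing j with
  | zero =>
    have hj' : j = s.length := by omega
    rw [hd, List.range'_zero, List.foldl_nil]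
    have : fillSeg s = s := by
      unfold fillSeg
      rw [if_neg]
      intro hmem
      obtain ⟨m, hm, hget⟩ := List.mem_iff_getElem.mp hmem
      exact hpre m (by omega) (by rw [List.getD_eq_getElem _ _ hm]; exact hget)
    rw [this]
  | succ d ih =>
    have hjl : j < s.length := by omega
    rw [hd, List.range'_succ, List.foldl_cons]
    by_cases h1 : s.getD j 0 = 1
    · -- found the first 1: the whole segment gets filled, the rest of the scan is inert
      have hstep : stepF (s ++ r) j = List.replicate s.length 1 ++ r := by
        unfold stepF
        rw [if_pos ⟨by rw [List.getD_append _ _ _ _ hjl]; exact h1, by simp; omega⟩]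
        have hbr : burnR (s ++ r) (j + 1) =
            s.take (j + 1) ++ List.replicate (s.length - (j + 1)) 1 ++ r :=
          burnR_eq (s.length - (j + 1)) s r (j + 1) rfl hs hr (by omega)
        have htk : s.take (j + 1) = s.take j ++ [1] := by
          rw [List.take_succ_eq_append_getElem hjl]
          rw [List.getD_eq_getElem _ _ hjl] at h1
          rw [h1]
        by_cases hj0 : j = 0
        · subst hj0
          rw [if_pos rfl, hbr, htk]
          simp only [List.take_zero, List.nil_append, List.singleton_append]
          conv_rhs => rw [show s.length = s.length - (0 + 1) + 1 from by omega]
          rw [List.replicate_succ]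
        · rw [if_neg hj0, hbr]
          rw [burnL_eq (j - 1) _ (by simp [List.length_take]; omega)
              (fun m hm => by
                rw [List.getD_append _ _ _ _ (by simp [List.length_take]; omega)]
                rw [List.getD_append _ _ _ _ (by simp [List.length_take]; omega)]
                rw [List.getD_eq_getElem _ _ (by simp [List.length_take]; omega)]
                have : (s.take (j+1))[m]'(by simp [List.length_take]; omega) = s[m]'(by omega) := by
                  exact List.getElem_take
                rw [this]
                exact hs _ (List.getElem_mem _))]
          have hj1 : j - 1 + 1 = j := by omega
          rw [hj1, htk]
          have hdrop : ((s.take j ++ [1]) ++ List.replicate (s.length - (j + 1)) 1 ++ r).drop j =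
              [1] ++ List.replicate (s.length - (j + 1)) 1 ++ r := by
            rw [List.append_assoc, List.append_assoc]
            rw [List.drop_append_of_le_length (by simp [List.length_take]; omega)]
            have : (s.take j).drop j = [] := by simp
            rw [this, List.nil_append, ← List.append_assoc]
          rw [hdrop]
          have : ([1] : List Int) ++ List.replicate (s.length - (j + 1)) 1 ++ r =
              List.replicate (s.length - j) 1 ++ r := by
            have h1e : ([1] : List Int) = List.replicate 1 1 := by rfl
            rw [h1e, ← List.replicate_add]
            have : 1 + (s.length - (j + 1)) = s.length - j := by omega
            rw [this]
          rw [this, ← List.append_assoc, ← List.replicate_add]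
          have : j + (s.length - j) = s.length := by omega
          rw [this]
      rw [hstep]
      have hfill : fillSeg s = List.replicate s.length 1 := by
        unfold fillSeg
        rw [if_pos]
        rw [List.getD_eq_getElem _ _ hjl] at h1
        exact h1 ▸ List.getElem_mem hjl
      rw [hfill]
      exact filled_fold _ _ r hr (fun i hi => by
        have := List.mem_range'_1.mp hi; omega)
    · have hstep : stepF (s ++ r) j = s ++ r := by
        unfold stepF
        rw [if_neg]
        intro ⟨ha, _⟩
        rw [List.getD_append _ _ _ _ hjl] at ha
        exact h1 ha
      rw [hstep]
      have hde : d = s.length - (j + 1) := by omega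
      rw [hde]
      exact ih (j + 1) (by omega) (by omega)
        (fun m hm => by
          rcases Nat.lt_or_ge m j with h | h
          · exact hpre m h
          · have : m = j := by omega
            subst this; exact h1)

theorem seg_lemma (s r : List Int) (hs : ∀ x ∈ s, x ≠ -1) (hr : Boundary r) :
    List.foldl stepF (s ++ r) (List.range s.length) = fillSeg s ++ r := by
  rw [List.range_eq_range']
  have := seg_scan s.length s r 0 (by omega) hs hr (by omega) (fun m hm => by omega)
  simpa using this

theorem spec1_no_neg (l : List Int) : ∀ seg, (-1 : Int) ∉ l → spec1 seg l = fillSeg (seg ++ l) := by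
  induction l with
  | nil => intro seg _; simp [spec1]
  | cons e t ih =>
    intro seg hm
    rw [spec1]
    rw [if_neg (by intro h; exact hm (by simp [h]))]
    rw [ih (seg ++ [e]) (by intro h; exact hm (by simp [h]))]
    simp

theorem spec1_split (s : List Int) : ∀ (seg t : List Int), (∀ x ∈ s, x ≠ -1) →
    spec1 seg (s ++ -1 :: t) = fillSeg (seg ++ s) ++ -1 :: spec1 [] t := by
  induction s with
  | nil => intro seg t _; simp [spec1]
  | cons e s' ih =>
    intro seg t hs
    rw [List.cons_append, spec1, if_neg (hs e (by simp))]
    rw [ih (seg ++ [e]) t (fun x hx => hs x (by simp [hx]))]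
    simp

theorem A_eq_spec1 (n : Nat) : ∀ l : List Int, l.length ≤ n →
    List.foldl stepF l (List.range l.length) = spec1 [] l := by
  induction n with
  | zero =>
    intro l hl
    have : l = [] := List.eq_nil_of_length_eq_zero (by omega)
    subst this; rfl
  | succ n ih =>
    intro l hl
    by_cases hm : (-1 : Int) ∈ l
    · -- split at the FIRST -1
      set p : Int → Bool := fun x => x != -1 with hp
      set s := l.takeWhile p with hsdef
      have hsplit : s ++ l.dropWhile p = l := List.takeWhile_append_dropWhile
      have hdne : l.dropWhile p ≠ [] := by
        intro h
        rw [h, List.append_nil] at hsplit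
        have : p (-1) = true := List.mem_takeWhile_imp (show (-1 : Int) ∈ s by rw [hsplit]; exact hm)
        simp [hp] at this
      obtain ⟨a, t, hat⟩ := List.exists_cons_of_ne_nil hdne
      have ha : a = -1 := by
        have h2 := List.head?_dropWhile_not p l
        rw [hat] at h2
        simpa [hp] using h2
      subst ha
      have hl2 : l = s ++ -1 :: t := by rw [← hsplit, hat]
      have hsne : ∀ x ∈ s, x ≠ -1 := by
        intro x hx
        have := List.mem_takeWhile_imp hx
        simpa [hp] using this
      rw [hl2]
      have hlen : (s ++ -1 :: t).length = (s.length + 1) + t.length := by simp; omega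
      rw [hlen, List.range_add, List.foldl_append, List.range_succ, List.foldl_append]
      -- first: the scan over the first segment
      have h1 : List.foldl stepF (s ++ -1 :: t) (List.range s.length) =
          fillSeg s ++ -1 :: t := seg_lemma s (-1 :: t) hsne (Or.inr ⟨t, rfl⟩)
      rw [h1]
      -- index s.length: sees the -1, no-op
      have h2 : stepF (fillSeg s ++ -1 :: t) s.length = fillSeg s ++ -1 :: t := by
        unfold stepF
        rw [if_neg]
        intro ⟨ha, _⟩
        rw [List.getD_append_right _ _ _ _ (by rw [length_fillSeg])] at ha
        rw [length_fillSeg] at ha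
        simp at ha
      simp only [List.foldl_cons, List.foldl_nil, h2]
      -- remaining indices act on t, shifted by s.length + 1
      have h3 : (List.range t.length).map (fun i => s.length + 1 + i) =
          (List.range t.length).map (fun i => (fillSeg s).length + 1 + i) := by
        rw [length_fillSeg]
      have h4 : List.foldl stepF (fillSeg s ++ -1 :: t)
          ((List.range t.length).map (fun i => s.length + 1 + i)) =
          fillSeg s ++ -1 :: List.foldl stepF t (List.range t.length) := by
        rw [h3]; exact foldl_stepF_shift (List.range t.length) (fillSeg s) t
      rw [h4, ih t (by rw [hl2] at hl; simp at hl; omega)]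
      rw [spec1_split s [] t hsne]
      simp
    · -- no -1 at all: one segment
      have : List.foldl stepF l (List.range l.length) = fillSeg l ++ [] := by
        have := seg_lemma l [] (fun x hx h => hm (h ▸ hx)) (Or.inl rfl)
        simpa using this
      rw [this, spec1_no_neg l [] hm]
      simp

theorem altGo_eq_spec1 (n : Nat) : ∀ l : List Int, l.length ≤ n → altGo l = spec1 [] l := by
  induction n with
  | zero =>
    intro l hl
    have : l = [] := List.eq_nil_of_length_eq_zero (by omega)
    subst this
    rw [altGo]
    rfl
  | succ n ih =>
    intro l hl
    rw [altGo]
    split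
    · -- no -1 from this point on
      rename_i hj
      have hmem : (-1 : Int) ∉ l := by
        intro hm
        have := List.findIdx?_eq_none_iff.mp hj _ hm
        simp at this
      rw [spec1_no_neg l [] hmem]
      simp
    · rename_i j hj
      rw [List.findIdx?_eq_some_iff_getElem] at hj
      obtain ⟨hjl, hpj, hlt⟩ := hj
      have hsplit : l = l.take j ++ -1 :: l.drop (j + 1) := by
        conv_lhs => rw [← List.take_append_drop j l]
        rw [List.drop_eq_getElem_cons hjl]
        simp at hpj
        rw [hpj]
      have hs : ∀ x ∈ l.take j, x ≠ -1 := by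
        intro x hx
        obtain ⟨m, hm, hget⟩ := List.mem_iff_getElem.mp hx
        have hmj : m < j := by simp [List.length_take] at hm; omega
        have : (l.take j)[m] = l[m]'(by omega) := List.getElem_take
        rw [this] at hget
        have := hlt m hmj
        simp at this
        rw [hget] at this
        exact fun he => this (by rw [he])
      conv_rhs => rw [hsplit]
      rw [spec1_split (l.take j) [] (l.drop (j + 1)) hs]
      rw [ih (l.drop (j + 1)) (by simp [List.length_drop]; omega)]
      simp

theorem spec1_no_one (l : List Int) : ∀ seg : List Int, (1 : Int) ∉ l → (1 : Int) ∉ seg →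
    spec1 seg l = seg ++ l := by
  induction l with
  | nil =>
    intro seg _ hseg
    simp [spec1, fillSeg, hseg]
  | cons e t ih =>
    intro seg hl hseg
    rw [spec1]
    by_cases he : e = -1
    · rw [if_pos he, ih [] (by intro h; exact hl (by simp [h])) (by simp)]
      simp [fillSeg, hseg, he]
    · rw [if_neg he, ih (seg ++ [e])
          (by intro h; exact hl (by simp [h]))
          (by intro h; rcases List.mem_append.mp h with h | h
              · exact hseg h
              · exact hl (by simp at h; simp [h]))]
      simp

theorem alt_eq_spec1 (l : List Int) : propagarmio_alt l = spec1 [] l := by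
  unfold propagarmio_alt
  by_cases h : (1 : Int) ∈ l
  · rw [if_pos h]
    exact altGo_eq_spec1 l.length l (le_refl _)
  · rw [if_neg h, spec1_no_one l [] h (by simp)]
    simp

-- ===== VERDICT (by name: the statement is the Claim_ definition above) =====
theorem propagarmio_spec : Claim_equal_propagarmio := by
  intro lista _
  unfold Spec_propagarmio propagarmio
  rw [A_eq_spec1 lista.length lista (le_refl _), alt_eq_spec1]
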